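-- pv_equiv track=rewrite | github.com/DanielYentin/MKS21QJI | 03_py/list2/sum67.py | sum67
-- ===== SOURCE A (Python) =====
-- def sum67(nums):
--   sum = 0
--   if len(nums) > 0:
--     found6 = False
--     for i in nums:
--       if not found6:
--         if i != 6:
--           sum += i
--         else:
--           found6 = True
--       else:
--         if i == 7:
--           found6 = False
--   return sum
-- ===== SOURCE B (Python) =====
-- def sum67(nums):
--   total = 0
--   i = 0
--   n = len(nums)
--   while i < n:
--     if nums[i] == 6:
--       i += 1
--       while i < n and nums[i] != 7:
--         i += 1
--       i += 1  # step past the closing 7 (or past the end)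
--     else:
--       total += nums[i]
--       i += 1
--   return total
-- ===== Notes on version B (the rewrite author's own statement) =====
-- stated objective: alternative
-- what changed: Replaces the per-element boolean-flag fold with an index-driven outer consume loop plus an inner skip loop that jumps over each 6..7 span.
import Mathlib
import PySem

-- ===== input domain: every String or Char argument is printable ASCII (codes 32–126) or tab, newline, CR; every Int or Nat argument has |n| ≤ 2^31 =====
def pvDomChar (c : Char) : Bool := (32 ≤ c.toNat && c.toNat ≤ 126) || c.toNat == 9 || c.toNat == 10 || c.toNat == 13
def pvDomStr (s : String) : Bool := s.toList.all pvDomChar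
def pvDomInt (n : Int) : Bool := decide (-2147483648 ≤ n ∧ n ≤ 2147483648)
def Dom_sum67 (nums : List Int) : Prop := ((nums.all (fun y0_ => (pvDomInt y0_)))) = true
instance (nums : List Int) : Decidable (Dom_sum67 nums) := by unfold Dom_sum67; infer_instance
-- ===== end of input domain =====

-- B replaces A's per-element boolean-flag fold with an outer consume / inner skip traversal; alternative decomposition, same cost.


-- ===== PORT A =====
-- literal transliteration of A: for-loop over nums with state (sum, found6)
def sum67 (nums : List Int) : Int :=
  let sum : Int := 0
  if nums.length > 0 then
    (nums.foldl (fun (st : Int × Bool) (i : Int) =>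
        if ¬ st.2 then
          if i ≠ 6 then (st.1 + i, st.2) else (st.1, true)
        else
          if i = 7 then (st.1, false) else st)
      (sum, false)).1
  else sum

-- ===== PORT B =====
-- B's outer consume loop / inner skip loop, as mutual structural recursion on the rest of the list
mutual
  -- outer loop: add non-6 elements; on a 6 hand the rest to the skip loop
  def sum67Go : List Int → Int
    | [] => 0
    | x :: xs => if x = 6 then sum67Skip xs else x + sum67Go xs
  -- inner loop: advance until a 7 is consumed (or the list ends), adding nothing
  def sum67Skip : List Int → Int
    | [] => 0
    | x :: xs => if x = 7 then sum67Go xs else sum67Skip xs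
end

def sum67_alt (nums : List Int) : Int := sum67Go nums

-- ===== PRECONDITION & SPEC =====
def Spec_sum67 (nums : List Int) (out : Int) : Prop := out = sum67_alt nums
instance (nums : List Int) (out : Int) : Decidable (Spec_sum67 nums out) := by unfold Spec_sum67; infer_instance

-- ===== CLAIM (what is proved, stated in full; the proofs are below) =====
def Claim_equal_sum67 : Prop := ∀ (nums : List Int), Dom_sum67 nums → Spec_sum67 nums (sum67 nums)

-- ===== LEMMAS AND PROOFS =====
def sum67Step (st : Int × Bool) (i : Int) : Int × Bool :=
  if ¬ st.2 then
    if i ≠ 6 then (st.1 + i, st.2) else (st.1, true)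
  else
    if i = 7 then (st.1, false) else st

theorem sum67_fold_inv (l : List Int) : ∀ (s : Int),
    (l.foldl sum67Step (s, false)).1 = s + sum67Go l ∧
    (l.foldl sum67Step (s, true)).1 = s + sum67Skip l := by
  induction l with
  | nil => intro s; simp [sum67Go, sum67Skip]
  | cons x xs ih =>
    intro s
    constructor
    · by_cases hx : x = 6
      · simpa [List.foldl, sum67Step, hx, sum67Go] using (ih s).2
      · have := (ih (s + x)).1
        simp [List.foldl, sum67Step, hx, sum67Go, this]
        ring
    · by_cases hx : x = 7
      · simpa [List.foldl, sum67Step, hx, sum67Skip] using (ih s).1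
      · simpa [List.foldl, sum67Step, hx, sum67Skip] using (ih s).2

-- ===== VERDICT (by name: the statement is the Claim_ definition above) =====
theorem sum67_spec : Claim_equal_sum67 := by
  intro nums _
  show sum67 nums = sum67_alt nums
  cases nums with
  | nil => rfl
  | cons x xs =>
    have h := (sum67_fold_inv (x :: xs) 0).1
    rw [zero_add] at h
    exact h
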